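-- pv_equiv track=rewrite | github.com/ChoHyoungSeo/Algorithm_prac | python/programmers/LV1/fruit_seller.py | solution
-- ===== SOURCE A (Python) =====
-- def solution(k, m, score):
--     answer = 0
--     start = 0
--     score.sort(reverse=True)
--     for _ in range(len(score) // m):
--         answer += min(score[start:start + m]) * m
--         start += m
--
--     return answer
-- ===== SOURCE B (Python) =====
-- def solution(k, m, score):
--     score.sort(reverse=True)
--     if m <= 0:
--         return 0
--     asc = score[::-1]
--     return _chunk_heads(m, asc[len(asc) % m:])
--
--
-- def _chunk_heads(m, rest):
--     if not rest:
--         return 0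
--     return m * rest[0] + _chunk_heads(m, rest[m:])
-- ===== Notes on version B (the rewrite author's own statement) =====
-- stated objective: alternative
-- what changed: A loops over group indices with a start pointer, slicing each descending m-block and taking its min; B instead reverses to ascending order, drops the len%m smallest leftovers, and recursively consumes the list m at a time, adding m times each chunk's head (no indices, no slices-with-min, sum built by recursion from the small end).
import Mathlib
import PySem

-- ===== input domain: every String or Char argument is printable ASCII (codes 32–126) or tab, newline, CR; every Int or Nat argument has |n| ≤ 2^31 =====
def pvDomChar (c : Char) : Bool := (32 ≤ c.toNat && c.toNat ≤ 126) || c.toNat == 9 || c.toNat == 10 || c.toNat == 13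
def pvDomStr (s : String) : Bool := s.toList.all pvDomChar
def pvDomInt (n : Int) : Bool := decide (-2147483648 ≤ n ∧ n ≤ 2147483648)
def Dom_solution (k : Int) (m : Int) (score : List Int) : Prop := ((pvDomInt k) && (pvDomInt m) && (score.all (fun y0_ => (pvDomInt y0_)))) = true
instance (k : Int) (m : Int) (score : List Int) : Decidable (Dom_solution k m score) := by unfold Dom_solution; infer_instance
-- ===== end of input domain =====

-- B replaces A's index loop (start pointer, slice of each descending m-block, inner min)
-- by a recursion over the ascending order: reverse, drop the len%m leftovers, and consume
-- m elements at a time, adding m * chunk head (objective: alternative decomposition).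
-- Both A and B sort `score` in place descending; the equivalence proved is about the
-- return value (the mutation is identical).

-- ===== PORT A =====
-- A: answer/start accumulator over range(len(score)//m); min over each slice.
-- `.getD 0` on min? is never reached under Pre_ (every slice the loop takes is nonempty).
def solution (k : Int) (m : Int) (score : List Int) : Int :=
  let s := PySem.List.sorted score (fun x => x) true
  let res :=
    (PySem.List.pyRange 0 (PySem.Int.floordiv (s.length : Int) m) 1).foldl
      (fun (st : Int × Int) _ =>
        (st.1 + ((PySem.List.min? (PySem.List.slice s (some st.2) (some (st.2 + m))) (fun x => x)).getD 0) * m,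
         st.2 + m))
      (0, 0)
  res.1

-- ===== PORT B =====
-- _chunk_heads(m, rest): rest[m:] is ported as dropping m.toNat = 1 + (m.toNat - 1)
-- elements of x :: xs — exact for the m ≥ 1 calls solution_alt makes (its m ≤ 0 guard).
def chunkHeads (m : Int) (rest : List Int) : Int :=
  match rest with
  | [] => 0
  | x :: xs => m * x + chunkHeads m (xs.drop (m.toNat - 1))
termination_by rest.length
decreasing_by simp [List.length_drop]

-- B: in-place descending sort kept; score[::-1] is the ascending order (slice?, never
-- none for step -1); then chunkHeads on asc[len(asc) % m:].
def solution_alt (k : Int) (m : Int) (score : List Int) : Int :=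
  let s := PySem.List.sorted score (fun x => x) true
  if m ≤ 0 then 0
  else
    let asc := (PySem.List.slice? s none none (-1)).getD []
    chunkHeads m (PySem.List.slice asc (some (PySem.Int.mod (asc.length : Int) m)) none)

-- ===== PRECONDITION & SPEC =====
-- A raises ZeroDivisionError when m = 0; nothing else is excluded.
def Pre_solution (k : Int) (m : Int) (score : List Int) : Prop := m ≠ 0
instance (k : Int) (m : Int) (score : List Int) : Decidable (Pre_solution k m score) := by unfold Pre_solution; infer_instance

def pvWitness_solution : Int × Int × List Int := (4, 3, [1, 5, 2, 9, 7, 3])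

def Spec_solution (k : Int) (m : Int) (score : List Int) (out : Int) : Prop := out = solution_alt k m score
instance (k : Int) (m : Int) (score : List Int) (out : Int) : Decidable (Spec_solution k m score out) := by unfold Spec_solution; infer_instance

-- ===== CLAIM (what is proved, stated in full; the proofs are below) =====
def Claim_equal_solution : Prop := ∀ (k : Int) (m : Int) (score : List Int), Dom_solution k m score → Pre_solution k m score → Spec_solution k m score (solution k m score)

-- ===== LEMMAS AND PROOFS =====

lemma chunkHeads_nil (m : Int) : chunkHeads m [] = 0 := by unfold chunkHeads; rfl

lemma chunkHeads_cons (m : Int) (x : Int) (xs : List Int) :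
    chunkHeads m (x :: xs) = m * x + chunkHeads m (xs.drop (m.toNat - 1)) := by
  rw [chunkHeads]

-- a List.range-map sum is the Finset.range sum (definitional)
lemma sum_map_range_eq (q : Nat) (f : Nat → Int) :
    ((List.range q).map f).sum = ∑ j ∈ Finset.range q, f j := rfl

-- minimum of a nonempty contiguous block of a descending list is its last element
lemma min_block_desc (s : List Int) (hp : s.Pairwise (fun a b => b ≤ a))
    (t mn : Nat) (hmn : 1 ≤ mn) (hle : t + mn ≤ s.length) :
    (PySem.List.min? ((s.drop t).take mn) (fun x => x)).getD 0 = s.getD (t + mn - 1) 0 := by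
  set seg := (s.drop t).take mn with hseg
  have hlen : seg.length = mn := by simp [hseg]; omega
  have hmono : ∀ i j : Nat, i < s.length → j < s.length → i ≤ j → s.getD j 0 ≤ s.getD i 0 := by
    intro i j hi hj hij
    rw [List.getD_eq_getElem s 0 hi, List.getD_eq_getElem s 0 hj]
    rcases Nat.lt_or_eq_of_le hij with h | h
    · exact (List.pairwise_iff_getElem.mp hp) i j hi hj h
    · subst h; exact le_refl _
  have hsegElem : ∀ i : Nat, i < mn → seg.getD i 0 = s.getD (t + i) 0 := by
    intro i hi
    rw [List.getD_eq_getElem seg 0 (by omega), List.getD_eq_getElem s 0 (by omega)]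
    simp [hseg, List.getElem_take, List.getElem_drop]
  have hlast : seg.getD (mn - 1) 0 = s.getD (t + mn - 1) 0 := by
    rw [hsegElem (mn - 1) (by omega)]
    congr 1
    omega
  have hlastmem : s.getD (t + mn - 1) 0 ∈ seg := by
    rw [← hlast, List.getD_eq_getElem seg 0 (by omega)]
    exact List.getElem_mem _
  have hne : seg ≠ [] := by
    intro h; rw [h] at hlen; simp at hlen; omega
  obtain ⟨v, hv⟩ : ∃ v, PySem.List.min? seg (fun x => x) = some v := by
    cases hmin : PySem.List.min? seg (fun x => x) with
    | none => exact absurd ((PySem.List.min?_eq_none_iff seg _).mp hmin) hne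
    | some v => exact ⟨v, rfl⟩
  have hvmem : v ∈ seg := PySem.List.min?_mem hv
  have hvmin : ∀ y ∈ seg, v ≤ y := fun y hy => PySem.List.min?_isMin hv y hy
  have hlastmin : ∀ y ∈ seg, s.getD (t + mn - 1) 0 ≤ y := by
    intro y hy
    obtain ⟨i, hi, hiy⟩ := List.getElem_of_mem hy
    rw [hlen] at hi
    have h1 : seg.getD i 0 = y := by rw [List.getD_eq_getElem seg 0 (by omega)]; exact hiy
    rw [← h1, hsegElem i hi]
    exact hmono (t + i) (t + mn - 1) (by omega) (by omega) (by omega)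
  rw [hv]
  simp only [Option.getD_some]
  exact le_antisymm (hvmin _ hlastmem) (hlastmin v hvmem)

-- A's loop over range(q) from (0,0): the accumulated state in closed form
lemma loopA (s : List Int) (m : Int) (q : Nat) :
    ((PySem.List.pyRange 0 (q : Int) 1).foldl
      (fun (st : Int × Int) _ =>
        (st.1 + ((PySem.List.min? (PySem.List.slice s (some st.2) (some (st.2 + m))) (fun x => x)).getD 0) * m,
         st.2 + m))
      (0, 0))
    = (((List.range q).map
          (fun (j : Nat) => ((PySem.List.min? (PySem.List.slice s (some ((j : Int) * m)) (some ((j : Int) * m + m))) (fun x => x)).getD 0) * m)).sum,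
       (q : Int) * m) := by
  induction q with
  | zero => simp [PySem.List.pyRange_one_eq_nil]
  | succ n ih =>
    have hcast : ((n + 1 : Nat) : Int) = (n : Int) + 1 := by push_cast; ring
    rw [hcast, PySem.List.pyRange_one_succ_right (by positivity), List.foldl_append, ih]
    simp only [List.foldl_cons, List.foldl_nil, List.range_succ, List.map_append,
      List.map_cons, List.map_nil, List.sum_append, List.sum_cons, List.sum_nil]
    refine Prod.ext ?_ ?_
    · simp
    · push_cast
      ring

-- B's recursion on a list of exactly q chunks of size mn, in closed form
lemma chunkHeads_closed (mn : Nat) (hmn : 1 ≤ mn) :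
    ∀ (q : Nat) (t : List Int), t.length = q * mn →
      chunkHeads (mn : Int) t
        = ((List.range q).map (fun (kk : Nat) => (mn : Int) * t.getD (kk * mn) 0)).sum := by
  intro q
  induction q with
  | zero =>
    intro t ht
    cases t with
    | nil => simp [chunkHeads_nil]
    | cons x xs => simp at ht
  | succ n ih =>
    intro t ht
    cases t with
    | nil => simp at ht; omega
    | cons x xs =>
      have hsm : (n + 1) * mn = n * mn + mn := by ring
      have hxl : xs.length + 1 = (n + 1) * mn := by simpa using ht
      have hxs : (xs.drop (mn - 1)).length = n * mn := by
        simp [List.length_drop]; omega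
      rw [chunkHeads_cons, Int.toNat_natCast, ih _ hxs]
      rw [List.range_succ_eq_map]
      simp only [List.map_cons, List.map_map, List.sum_cons]
      congr 1
      · simp
      · refine congrArg _ (List.map_congr_left ?_)
        intro kk hkk
        rw [List.mem_range] at hkk
        simp only [Function.comp]
        congr 1
        have h1 : kk * mn < (xs.drop (mn - 1)).length := by
          rw [hxs]; exact (Nat.mul_lt_mul_right (by omega)).mpr hkk
        have h2 : (kk + 1) * mn = (mn - 1) + kk * mn + 1 := by
          have h3 : (kk + 1) * mn = kk * mn + mn := by ring
          omega
        rw [List.getD_eq_getElem _ 0 h1,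
            List.getD_eq_getElem (x :: xs) 0
              (by simp only [List.length_cons]
                  have h4 : (kk + 1) * mn ≤ (n + 1) * mn :=
                    Nat.mul_le_mul_right mn (by omega)
                  have h3 : (kk + 1) * mn = kk * mn + mn := by ring
                  omega : (kk + 1) * mn < (x :: xs).length)]
        rw [List.getElem_drop]
        simp only [h2, List.getElem_cons_succ]

-- ===== VERDICT (by name: the statement is the Claim_ definition above) =====
theorem solution_spec : Claim_equal_solution := by
  intro k m score _ hpre
  unfold Spec_solution solution solution_alt
  simp only []
  set s := PySem.List.sorted score (fun x => x) true with hs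
  rcases lt_or_gt_of_ne hpre with hneg | hpos
  · -- m < 0 : A's loop is empty, B's guard fires; both 0
    rw [if_pos (by omega : m ≤ 0)]
    have hfd : PySem.Int.floordiv (s.length : Int) m ≤ 0 := by
      have h1 := PySem.Int.floordiv_mul_add_mod (s.length : Int) m
      have h2 := PySem.Int.mod_neg_bounds (a := (s.length : Int)) (b := m) hneg
      set d := PySem.Int.floordiv (s.length : Int) m with hd
      by_contra hcon
      have hcon2 : 0 < d := by omega
      have : d * m < 0 := mul_neg_of_pos_of_neg hcon2 hneg
      have hn : (0 : Int) ≤ (s.length : Int) := by positivity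
      omega
    rw [PySem.List.pyRange_one_eq_nil hfd]
    simp
  · -- m > 0 : both equal the sum over the q = n / m selected elements
    obtain ⟨mn, hmn⟩ : ∃ mn : Nat, m = (mn : Int) := ⟨m.toNat, by omega⟩
    subst hmn
    have hmn1 : 1 ≤ mn := by exact_mod_cast hpos
    rw [if_neg (by omega : ¬ (mn : Int) ≤ 0)]
    set n := s.length with hn
    set q := n / mn with hqdef
    set r := n % mn with hrdef
    have hnq : q * mn + r = n := by
      rw [hqdef, hrdef, Nat.mul_comm]; exact Nat.div_add_mod n mn
    -- A side
    have hfd : PySem.Int.floordiv (n : Int) (mn : Int) = ((q : Nat) : Int) := by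
      rw [hqdef]; exact_mod_cast PySem.Int.floordiv_natCast n mn
    have hpair : s.Pairwise (fun a b => b ≤ a) := by
      have := PySem.List.sorted_pairwise_rev (xs := score) (key := fun x => x)
      simpa [← hs] using this
    rw [hfd, loopA]
    -- B side
    rw [PySem.List.slice?_none_none_neg_one]
    simp only [Option.getD_some]
    have hrevlen : s.reverse.length = n := by simp [hn]
    have hmod : PySem.Int.mod ((s.reverse.length : Int)) (mn : Int) = ((r : Nat) : Int) := by
      rw [hrevlen, hrdef]; exact_mod_cast PySem.Int.mod_natCast n mn
    rw [hmod, PySem.List.slice_from_natCast]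
    have htlen : (s.reverse.drop r).length = q * mn := by
      simp [hrevlen]; omega
    rw [chunkHeads_closed mn hmn1 q _ htlen]
    -- both sides are sums over List.range q; compare via Finset reflection
    have hterm : ∀ kk : Nat, kk < q →
        (mn : Int) * (s.reverse.drop r).getD (kk * mn) 0
          = s.getD ((q - 1 - kk) * mn + mn - 1) 0 * (mn : Int) := by
      intro kk hkk
      have hklt : kk * mn < (s.reverse.drop r).length := by
        rw [htlen]; exact (Nat.mul_lt_mul_right (by omega)).mpr hkk
      have hk1 : (kk + 1) * mn = kk * mn + mn := by ring
      have hidx : r + kk * mn < n := by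
        have h5 : (kk + 1) * mn ≤ q * mn := Nat.mul_le_mul_right mn (by omega)
        omega
      have he1 : (q - 1 - kk) * mn + (kk + 1) * mn = q * mn := by
        have h6 : (q - 1 - kk) + (kk + 1) = q := by omega
        calc (q - 1 - kk) * mn + (kk + 1) * mn = ((q - 1 - kk) + (kk + 1)) * mn := by ring
          _ = q * mn := by rw [h6]
      have hAidx : (q - 1 - kk) * mn + mn - 1 < n := by omega
      rw [List.getD_eq_getElem _ 0 hklt, List.getD_eq_getElem s 0 hAidx,
          List.getElem_drop, List.getElem_reverse]
      rw [mul_comm]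
      congr 2
      rw [← hn]
      omega
    calc ((List.range q).map
            (fun (j : Nat) => ((PySem.List.min? (PySem.List.slice s (some ((j : Int) * (mn : Int))) (some ((j : Int) * (mn : Int) + (mn : Int)))) (fun x => x)).getD 0) * (mn : Int))).sum
        = ((List.range q).map (fun (j : Nat) => s.getD (j * mn + mn - 1) 0 * (mn : Int))).sum := by
          refine congrArg _ (List.map_congr_left ?_)
          intro j hj
          rw [List.mem_range] at hj
          have hk1 : (j + 1) * mn = j * mn + mn := by ring
          have hbound : j * mn + mn ≤ n := by
            have h5 : (j + 1) * mn ≤ q * mn := Nat.mul_le_mul_right mn (by omega)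
            omega
          have hcast1 : (j : Int) * (mn : Int) = ((j * mn : Nat) : Int) := by
            push_cast; ring
          have hslice : PySem.List.slice s (some ((j : Int) * (mn : Int))) (some ((j : Int) * (mn : Int) + (mn : Int)))
              = (s.drop (j * mn)).take mn := by
            rw [hcast1, ← Int.natCast_add, PySem.List.slice_natCast]
            congr 1
            omega
          rw [hslice, min_block_desc s hpair (j * mn) mn hmn1 hbound]
      _ = ∑ j ∈ Finset.range q, s.getD (j * mn + mn - 1) 0 * (mn : Int) :=
          sum_map_range_eq q _
      _ = ∑ kk ∈ Finset.range q, s.getD ((q - 1 - kk) * mn + mn - 1) 0 * (mn : Int) :=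
          (Finset.sum_range_reflect (fun j => s.getD (j * mn + mn - 1) 0 * (mn : Int)) q).symm
      _ = ((List.range q).map (fun (kk : Nat) => s.getD ((q - 1 - kk) * mn + mn - 1) 0 * (mn : Int))).sum :=
          (sum_map_range_eq q _).symm
      _ = ((List.range q).map (fun (kk : Nat) => (mn : Int) * (s.reverse.drop r).getD (kk * mn) 0)).sum := by
          refine congrArg _ (List.map_congr_left ?_)
          intro kk hkk
          rw [List.mem_range] at hkk
          exact (hterm kk hkk).symm
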